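-- pv_equiv track=rewrite | github.com/daju01/VECM | vecm_project/scripts/vecm_master_exports.py | match_price_col
-- ===== SOURCE A (Python) =====
-- from typing import Dict, Iterable, List, Optional, Tuple
--
-- def match_price_col(columns: Iterable[str], ticker: str) -> Optional[str]:
--     ticker = ticker.upper().strip()
--     for col in columns:
--         upper = col.upper()
--         if upper == ticker:
--             return col
--         if upper == f"{ticker}.JK":
--             return col
--     for col in columns:
--         upper = col.upper()
--         if upper.startswith(f"{ticker}."):
--             return col
--     for col in columns:
--         upper = col.upper()
--         if ticker in upper.replace("_", "."):
--             return col
--     return None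
-- ===== SOURCE B (Python) =====
-- def match_price_col(columns, ticker):
--     # Single pass: rank 1 = exact/.JK (return at once), rank 2 = prefix "T.",
--     # rank 3 = substring of upper with '_'->'.'; keep earliest best-ranked column.
--     t = ticker.upper().strip()
--     best = None
--     best_rank = 4
--     for col in columns:
--         upper = col.upper()
--         if upper == t or upper == t + ".JK":
--             return col
--         if best_rank > 2 and upper.startswith(t + "."):
--             best, best_rank = col, 2
--         elif best_rank > 3 and t in upper.replace("_", "."):
--             best, best_rank = col, 3
--     return best
-- ===== Notes on version B (the rewrite author's own statement) =====
-- stated objective: alternative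
-- what changed: Replaces A's three sequential scans of the column list with one pass that tracks the earliest best-ranked candidate and returns immediately on a rank-1 match.
import Mathlib
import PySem

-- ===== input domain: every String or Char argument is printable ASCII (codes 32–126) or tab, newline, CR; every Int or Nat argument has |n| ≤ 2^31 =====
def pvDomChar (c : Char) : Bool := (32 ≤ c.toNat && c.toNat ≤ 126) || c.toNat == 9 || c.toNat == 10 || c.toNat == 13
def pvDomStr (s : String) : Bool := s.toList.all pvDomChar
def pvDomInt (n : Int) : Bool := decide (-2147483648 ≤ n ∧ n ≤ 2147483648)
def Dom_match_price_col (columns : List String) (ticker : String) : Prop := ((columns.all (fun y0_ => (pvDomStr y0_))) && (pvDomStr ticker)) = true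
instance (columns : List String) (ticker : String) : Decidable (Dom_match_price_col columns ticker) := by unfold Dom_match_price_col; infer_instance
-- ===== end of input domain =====

-- B replaces A's three sequential scans with one pass tracking the earliest best-ranked candidate (one traversal instead of three).

-- ===== PORT A =====
-- first loop of A: exact match or ticker + ".JK"
def pvTier1 (t : List Char) : List String → Option String
  | [] => none
  | col :: rest =>
    let u := PySem.Chars.upper col.toList
    if u = t then some col
    else if u = t ++ ['.', 'J', 'K'] then some col
    else pvTier1 t rest

-- second loop of A: upper.startswith(ticker + ".")
def pvTier2 (t : List Char) : List String → Option String
  | [] => none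
  | col :: rest =>
    let u := PySem.Chars.upper col.toList
    if PySem.Chars.startswith u (t ++ ['.']) then some col
    else pvTier2 t rest

-- third loop of A: ticker in upper.replace("_", ".")
def pvTier3 (t : List Char) : List String → Option String
  | [] => none
  | col :: rest =>
    let u := PySem.Chars.upper col.toList
    if PySem.Chars.isIn t (PySem.Chars.replace u ['_'] ['.']) then some col
    else pvTier3 t rest

def match_price_col (columns : List String) (ticker : String) : Option String :=
  let t := PySem.Chars.strip (PySem.Chars.upper ticker.toList)
  match pvTier1 t columns with
  | some c => some c
  | none =>
    match pvTier2 t columns with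
    | some c => some c
    | none => pvTier3 t columns

-- ===== PORT B =====
-- single pass; `best`/`bestRank` mirror Source B's accumulator (rank 4 = nothing yet)
def pvAltLoop (t : List Char) (best : Option String) (bestRank : Nat) : List String → Option String
  | [] => best
  | col :: rest =>
    let u := PySem.Chars.upper col.toList
    if u = t ∨ u = t ++ ['.', 'J', 'K'] then some col
    else if 2 < bestRank ∧ PySem.Chars.startswith u (t ++ ['.']) = true then
      pvAltLoop t (some col) 2 rest
    else if 3 < bestRank ∧ PySem.Chars.isIn t (PySem.Chars.replace u ['_'] ['.']) = true then
      pvAltLoop t (some col) 3 rest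
    else pvAltLoop t best bestRank rest

def match_price_col_alt (columns : List String) (ticker : String) : Option String :=
  pvAltLoop (PySem.Chars.strip (PySem.Chars.upper ticker.toList)) none 4 columns

-- ===== PRECONDITION & SPEC =====
def Spec_match_price_col (columns : List String) (ticker : String) (out : Option String) : Prop := out = match_price_col_alt columns ticker
instance (columns : List String) (ticker : String) (out : Option String) : Decidable (Spec_match_price_col columns ticker out) := by unfold Spec_match_price_col; infer_instance

-- ===== CLAIM (what is proved, stated in full; the proofs are below) =====
def Claim_equal_match_price_col : Prop := ∀ (columns : List String) (ticker : String), Dom_match_price_col columns ticker → Spec_match_price_col columns ticker (match_price_col columns ticker)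

-- ===== LEMMAS AND PROOFS =====

-- once a rank-2 candidate is stored, only a rank-1 match can override it
theorem pvAltLoop_two (t : List Char) (b : String) (cols : List String) :
    pvAltLoop t (some b) 2 cols =
      match pvTier1 t cols with
      | some c => some c
      | none => some b := by
  induction cols with
  | nil => rfl
  | cons col rest ih =>
    simp only [pvAltLoop, pvTier1]
    by_cases h1 : PySem.Chars.upper col.toList = t
    · simp [h1]
    · by_cases h2 : PySem.Chars.upper col.toList = t ++ ['.', 'J', 'K']
      · simp [h2]
      · simp [h1, h2, ih]

-- once a rank-3 candidate is stored, a rank-1 or rank-2 match can override it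
theorem pvAltLoop_three (t : List Char) (b : String) (cols : List String) :
    pvAltLoop t (some b) 3 cols =
      match pvTier1 t cols with
      | some c => some c
      | none =>
        match pvTier2 t cols with
        | some c => some c
        | none => some b := by
  induction cols with
  | nil => rfl
  | cons col rest ih =>
    simp only [pvAltLoop, pvTier1, pvTier2]
    by_cases h1 : PySem.Chars.upper col.toList = t
    · simp [h1]
    · by_cases h2 : PySem.Chars.upper col.toList = t ++ ['.', 'J', 'K']
      · simp [h2]
      · by_cases h3 : PySem.Chars.startswith (PySem.Chars.upper col.toList) (t ++ ['.']) = true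
        · simp [h1, h2, h3, pvAltLoop_two]
        · simp [h1, h2, h3, ih]

-- empty state: the single pass computes the three-tier chain
theorem pvAltLoop_four (t : List Char) (cols : List String) :
    pvAltLoop t none 4 cols =
      match pvTier1 t cols with
      | some c => some c
      | none =>
        match pvTier2 t cols with
        | some c => some c
        | none => pvTier3 t cols := by
  induction cols with
  | nil => rfl
  | cons col rest ih =>
    simp only [pvAltLoop, pvTier1, pvTier2, pvTier3]
    by_cases h1 : PySem.Chars.upper col.toList = t
    · simp [h1]
    · by_cases h2 : PySem.Chars.upper col.toList = t ++ ['.', 'J', 'K']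
      · simp [h2]
      · by_cases h3 : PySem.Chars.startswith (PySem.Chars.upper col.toList) (t ++ ['.']) = true
        · simp [h1, h2, h3, pvAltLoop_two]
        · by_cases h4 : PySem.Chars.isIn t (PySem.Chars.replace (PySem.Chars.upper col.toList) ['_'] ['.']) = true
          · simp [h1, h2, h3, h4, pvAltLoop_three]
          · simp [h1, h2, h3, h4, ih]

-- ===== VERDICT (by name: the statement is the Claim_ definition above) =====
theorem match_price_col_spec : Claim_equal_match_price_col := by
  intro columns ticker _
  unfold Spec_match_price_col match_price_col match_price_col_alt
  exact (pvAltLoop_four _ _).symm
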